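-- pv_equiv track=rewrite | github.com/Sheriffy4/intellirefactor | intellirefactor/analysis/decomposition/clustering.py | _has_variant_mix
-- ===== SOURCE A (Python) =====
-- from typing import Dict, List, Set, Tuple, Optional
--
-- def _has_variant_mix(method_names: List[str]) -> bool:
--     variants = ["_no_signal", "_strict", "_unsafe", "_legacy", "_fast", "_slow", "_v2"]
--
--     for variant in variants:
--         has_variant = any(variant in name for name in method_names)
--         has_non_variant = any(variant not in name for name in method_names)
--         if has_variant and has_non_variant:
--             return True
--
--     return False
-- ===== SOURCE B (Python) =====
-- def _has_variant_mix(method_names):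
--     variants = ("_no_signal", "_strict", "_unsafe", "_legacy", "_fast", "_slow", "_v2")
--     if not method_names:
--         return False
--     first, rest = method_names[0], method_names[1:]
--     sig0 = [v in first for v in variants]
--     return any([v in name for v in variants] != sig0 for name in rest)
-- ===== Notes on version B (the rewrite author's own statement) =====
-- stated objective: alternative
-- what changed: Instead of scanning the whole name list twice per variant suffix, B computes each name's variant-containment signature in one pass and returns True iff some name's signature differs from the first name's signature.
import Mathlib
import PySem

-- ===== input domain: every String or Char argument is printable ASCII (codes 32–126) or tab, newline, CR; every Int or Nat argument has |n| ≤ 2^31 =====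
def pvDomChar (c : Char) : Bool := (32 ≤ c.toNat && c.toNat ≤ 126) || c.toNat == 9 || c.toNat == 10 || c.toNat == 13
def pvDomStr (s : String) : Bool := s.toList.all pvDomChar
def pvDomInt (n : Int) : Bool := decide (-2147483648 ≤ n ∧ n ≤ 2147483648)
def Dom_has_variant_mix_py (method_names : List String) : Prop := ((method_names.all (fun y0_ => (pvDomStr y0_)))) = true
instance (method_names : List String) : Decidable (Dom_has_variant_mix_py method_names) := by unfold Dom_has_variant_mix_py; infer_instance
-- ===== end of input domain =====

-- B computes each name's variant-containment signature once and compares against the first name's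
-- signature, instead of A's per-variant rescans of the whole name list (objective: alternative).


-- ===== PORT A =====
def pvVariantsA : List String := ["_no_signal", "_strict", "_unsafe", "_legacy", "_fast", "_slow", "_v2"]

-- A's for-loop over variants with early return
def pvLoopA (method_names : List String) : List String → Bool
  | [] => false
  | variant :: rest =>
      let has_variant := method_names.any (fun name => PySem.Str.isIn variant name)
      let has_non_variant := method_names.any (fun name => !(PySem.Str.isIn variant name))
      if has_variant && has_non_variant then true
      else pvLoopA method_names rest

def has_variant_mix_py (method_names : List String) : Bool :=
  pvLoopA method_names pvVariantsA

-- ===== PORT B =====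
def pvVariantsB : List String := ["_no_signal", "_strict", "_unsafe", "_legacy", "_fast", "_slow", "_v2"]

-- [v in name for v in variants]
def pvSigB (name : String) : List Bool :=
  pvVariantsB.map (fun v => PySem.Str.isIn v name)

def has_variant_mix_py_alt (method_names : List String) : Bool :=
  match method_names with
  | [] => false
  | first :: rest =>
      let sig0 := pvSigB first
      rest.any (fun name => pvSigB name != sig0)

-- ===== PRECONDITION & SPEC =====
def Spec_has_variant_mix_py (method_names : List String) (out : Bool) : Prop := out = has_variant_mix_py_alt method_names
instance (method_names : List String) (out : Bool) : Decidable (Spec_has_variant_mix_py method_names out) := by unfold Spec_has_variant_mix_py; infer_instance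

-- ===== CLAIM (what is proved, stated in full; the proofs are below) =====
def Claim_equal_has_variant_mix_py : Prop := ∀ (method_names : List String), Dom_has_variant_mix_py method_names → Spec_has_variant_mix_py method_names (has_variant_mix_py method_names)

-- ===== LEMMAS AND PROOFS =====

-- A's loop returns true iff some variant is mixed: some name contains it and some name does not.
theorem pvLoopA_eq_true_iff (names : List String) (vs : List String) :
    pvLoopA names vs = true ↔
      ∃ v ∈ vs, (∃ n ∈ names, PySem.Str.isIn v n = true) ∧
                (∃ n ∈ names, PySem.Str.isIn v n = false) := by
  induction vs with
  | nil => simp [pvLoopA]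
  | cons v rest ih =>
      simp only [pvLoopA, List.any_eq_true, Bool.and_eq_true, Bool.not_eq_eq_eq_not,
        Bool.not_true]
      split_ifs with h
      · simp only [true_iff]
        exact ⟨v, List.mem_cons_self, by simpa [List.any_eq_true] using h.1,
          by simpa [List.any_eq_true, Bool.not_eq_eq_eq_not] using h.2⟩
      · rw [ih]
        constructor
        · rintro ⟨w, hw, h1, h2⟩; exact ⟨w, List.mem_cons_of_mem _ hw, h1, h2⟩
        · rintro ⟨w, hw, h1, h2⟩
          rcases List.mem_cons.mp hw with rfl | hw'
          · exact absurd (by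
              simpa [List.any_eq_true, Bool.not_eq_eq_eq_not] using And.intro h1 h2) h
          · exact ⟨w, hw', h1, h2⟩

-- two maps over the same list differ iff the functions differ on some element
theorem pvMap_ne_iff {α β : Type} (f g : α → β) (l : List α) :
    l.map f ≠ l.map g ↔ ∃ x ∈ l, f x ≠ g x := by
  constructor
  · intro h
    by_contra hc
    push Not at hc
    exact h (List.map_congr_left hc)
  · rintro ⟨x, hx, hfg⟩ h
    exact hfg (List.map_inj_left.mp h x hx)

-- B's signature comparison detects exactly the mixed variants over first :: rest.
theorem pvAlt_iff (first : String) (rest : List String) :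
    (rest.any (fun name => pvSigB name != pvSigB first)) = true ↔
      ∃ v ∈ pvVariantsB,
        (∃ n ∈ first :: rest, PySem.Str.isIn v n = true) ∧
        (∃ n ∈ first :: rest, PySem.Str.isIn v n = false) := by
  simp only [List.any_eq_true, bne_iff_ne, ne_eq]
  constructor
  · rintro ⟨n, hn, hne⟩
    obtain ⟨v, hv, hvne⟩ := (pvMap_ne_iff _ _ _).mp hne
    cases h1 : PySem.Str.isIn v n
    · cases h2 : PySem.Str.isIn v first
      · exact absurd (h1.trans h2.symm) hvne
      · exact ⟨v, hv, ⟨first, List.mem_cons_self, h2⟩, ⟨n, List.mem_cons_of_mem _ hn, h1⟩⟩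
    · cases h2 : PySem.Str.isIn v first
      · exact ⟨v, hv, ⟨n, List.mem_cons_of_mem _ hn, h1⟩, ⟨first, List.mem_cons_self, h2⟩⟩
      · exact absurd (h1.trans h2.symm) hvne
  · rintro ⟨v, hv, ⟨n1, hn1, h1⟩, ⟨n2, hn2, h2⟩⟩
    cases hf : PySem.Str.isIn v first
    · -- first lacks v; the witness n1 that contains v must be in rest
      have hne : n1 ≠ first := fun e => by rw [e, hf] at h1; exact Bool.noConfusion h1
      rcases List.mem_cons.mp hn1 with rfl | hr
      · exact absurd rfl hne
      · exact ⟨n1, hr, (pvMap_ne_iff _ _ _).mpr ⟨v, hv, by rw [h1, hf]; decide⟩⟩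
    · -- first contains v; the witness n2 that lacks v must be in rest
      have hne : n2 ≠ first := fun e => by rw [e, hf] at h2; exact Bool.noConfusion h2
      rcases List.mem_cons.mp hn2 with rfl | hr
      · exact absurd rfl hne
      · exact ⟨n2, hr, (pvMap_ne_iff _ _ _).mpr ⟨v, hv, by rw [h2, hf]; decide⟩⟩

-- ===== VERDICT (by name: the statement is the Claim_ definition above) =====
theorem has_variant_mix_py_spec : Claim_equal_has_variant_mix_py := by
  intro method_names _
  unfold Spec_has_variant_mix_py has_variant_mix_py has_variant_mix_py_alt
  cases method_names with
  | nil => decide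
  | cons first rest =>
      show pvLoopA (first :: rest) pvVariantsA = rest.any (fun name => pvSigB name != pvSigB first)
      have hA := pvLoopA_eq_true_iff (first :: rest) pvVariantsA
      have hB := pvAlt_iff first rest
      have hVar : pvVariantsA = pvVariantsB := rfl
      rw [hVar] at hA
      cases hval : pvLoopA (first :: rest) pvVariantsA
      · cases hbv : (rest.any fun name => pvSigB name != pvSigB first) with
        | false => rfl
        | true =>
            have hx := hA.mpr (hB.mp hbv)
            rw [hVar] at hval
            rw [hval] at hx
            exact Bool.noConfusion hx
      · exact (hB.mpr (hA.mp hval)).symm
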